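-- pv_equiv track=rewrite | github.com/mohamedahmed-cloud/Problem-Solving | Random/07.Naming a Company.py | solve
-- ===== SOURCE A (Python) =====
-- def solve(ideas):
--     l= [set() for _ in range(26)]
--     ans=0
--     for i in ideas:
--         l[ord(i[0])-ord("a")].add(i[1:])
--     for i in range(26):
--         s1=l[i]
--         x1=len(s1)
--         for j in range(i,26):
--             s2=l[j]
--             x2=len(s2)
--             s2=s2.union(s1)
--             ans+=(len(s2)-x2)*(len(s2)-x1)
--     return ans*2
-- ===== SOURCE B (Python) =====
-- def solve(ideas):
--     buckets = [set() for _ in range(26)]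
--     for i in ideas:
--         buckets[ord(i[0]) - ord("a")].add(i[1:])
--     # inverted index: one pass over the buckets; for each suffix, the buckets
--     # already seen that contain it; count shared suffixes per letter pair.
--     seen = {}          # suffix -> list of bucket indices (increasing) holding it
--     common = {}        # (i, j) with i < j -> number of suffixes shared by buckets i and j
--     for j in range(26):
--         for suf in buckets[j]:
--             for i in seen.get(suf, []):
--                 common[(i, j)] = common.get((i, j), 0) + 1
--             seen.setdefault(suf, []).append(j)
--     ans = 0
--     for i in range(26):
--         for j in range(i + 1, 26):
--             c = common.get((i, j), 0)
--             ans += (len(buckets[i]) - c) * (len(buckets[j]) - c)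
--     return 2 * ans
-- ===== Notes on version B (the rewrite author's own statement) =====
-- stated objective: alternative
-- what changed: Keeps A's grouping loop but replaces A's 26x26 pairwise set-union recomputation with a single pass over the buckets that maintains an inverted index (suffix -> buckets seen so far) and a counter dict of shared-suffix counts per letter pair, then combines sizes and counts with the product formula (x_i-c_ij)*(x_j-c_ij).
import Mathlib
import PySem

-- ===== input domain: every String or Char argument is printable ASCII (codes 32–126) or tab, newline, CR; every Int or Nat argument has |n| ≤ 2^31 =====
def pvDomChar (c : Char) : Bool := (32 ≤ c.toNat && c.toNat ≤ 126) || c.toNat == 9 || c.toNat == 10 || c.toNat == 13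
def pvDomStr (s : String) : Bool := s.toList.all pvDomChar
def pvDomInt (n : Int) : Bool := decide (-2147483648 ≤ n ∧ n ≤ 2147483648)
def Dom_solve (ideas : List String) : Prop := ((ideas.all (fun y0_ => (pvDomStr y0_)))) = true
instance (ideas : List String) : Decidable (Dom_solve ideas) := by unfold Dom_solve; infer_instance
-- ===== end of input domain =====

-- B replaces A's pairwise set-union recomputation by a one-pass inverted index over the
-- same buckets (alternative decomposition; equal return value proved below).

-- ===== PORT A =====
-- shared grouping loop (textually identical first loop in Source A and Source B):
-- l[ord(i[0]) - ord("a")].add(i[1:]) — Python list indexing with negative wraparound;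
-- an IndexError (empty idea, or first letter outside 'G'..'z') is excluded by Pre_solve.
def groupStep (l : List (PySem.Set String)) (s : String) : List (PySem.Set String) :=
  match PySem.Str.pyGet? s 0 with
  | none => l      -- Python: IndexError on i[0] (outside Pre_solve)
  | some c =>
    let k : Int := (c.toNat : Int) - 97
    let k' : Int := if k < 0 then k + 26 else k   -- Python negative list index
    if 0 ≤ k' ∧ k' < 26 then
      l.set k'.toNat
        (PySem.Set.add (l.getD k'.toNat PySem.Set.empty) (PySem.Str.slice s (some 1) none))
    else l         -- Python: IndexError, list index out of range (outside Pre_solve)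

def mkBuckets (ideas : List String) : List (PySem.Set String) :=
  ideas.foldl groupStep (List.replicate 26 PySem.Set.empty)

def solve (ideas : List String) : Int :=
  let l := mkBuckets ideas
  ((PySem.List.pyRange 0 26).foldl (fun ans i =>
    let s1 := PySem.List.pyGetD l i PySem.Set.empty
    let x1 : Int := s1.length
    (PySem.List.pyRange i 26).foldl (fun ans j =>
      let s2 := PySem.List.pyGetD l j PySem.Set.empty
      let x2 : Int := s2.length
      let s2' := PySem.Set.union s2 s1
      ans + ((s2'.length : Int) - x2) * ((s2'.length : Int) - x1)) ans) 0) * 2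

-- ===== PORT B =====
-- inner loop body of Source B: look up the buckets already holding this suffix, bump the
-- shared-suffix counter for each such earlier bucket, then record this bucket.
def altStep (j : Int) (st : PySem.Dict String (List Int) × PySem.Dict (Int × Int) Int)
    (suf : String) : PySem.Dict String (List Int) × PySem.Dict (Int × Int) Int :=
  let prev := st.1.getD suf []
  let common := prev.foldl (fun cm i => cm.insert (i, j) (cm.getD (i, j) 0 + 1)) st.2
  (st.1.insert suf (prev ++ [j]), common)

def invStep (buckets : List (PySem.Set String))
    (st : PySem.Dict String (List Int) × PySem.Dict (Int × Int) Int) (j : Int) :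
    PySem.Dict String (List Int) × PySem.Dict (Int × Int) Int :=
  (PySem.List.pyGetD buckets j PySem.Set.empty).foldl (altStep j) st

def solve_alt (ideas : List String) : Int :=
  let buckets := mkBuckets ideas
  let st := (PySem.List.pyRange 0 26).foldl (invStep buckets) (PySem.Dict.empty, PySem.Dict.empty)
  let common := st.2
  2 * (PySem.List.pyRange 0 26).foldl (fun ans i =>
    (PySem.List.pyRange (i + 1) 26).foldl (fun ans j =>
      let c := common.getD (i, j) 0
      ans + (((PySem.List.pyGetD buckets i PySem.Set.empty).length : Int) - c)
          * (((PySem.List.pyGetD buckets j PySem.Set.empty).length : Int) - c)) ans) 0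

-- ===== PRECONDITION & SPEC =====
-- Pre_solve = exactly the inputs where Python A returns: every idea is nonempty and its
-- first letter has code 71..122 ('G'..'z', the codes Python's negative list indexing accepts).
def Pre_solve (ideas : List String) : Prop :=
  ∀ s ∈ ideas, s.toList ≠ [] ∧ 71 ≤ (s.toList.headD 'a').toNat ∧ (s.toList.headD 'a').toNat ≤ 122
instance (ideas : List String) : Decidable (Pre_solve ideas) := by unfold Pre_solve; infer_instance

def pvWitness_solve : List String := ["coffee", "donuts", "time", "toffee"]

def Spec_solve (ideas : List String) (out : Int) : Prop := out = solve_alt ideas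
instance (ideas : List String) (out : Int) : Decidable (Spec_solve ideas out) := by unfold Spec_solve; infer_instance

-- ===== CLAIM (what is proved, stated in full; the proofs are below) =====
def Claim_equal_solve : Prop := ∀ (ideas : List String), Dom_solve ideas → Pre_solve ideas → Spec_solve ideas (solve ideas)

-- ===== LEMMAS AND PROOFS =====

-- proof-only abbreviations: bucket k of a bucket list, the shared-suffix count of a pair,
-- and the contents of B's 'seen'/'common' dicts after the first n buckets were processed
def bkt (bl : List (PySem.Set String)) (k : Nat) : PySem.Set String := bl.getD k PySem.Set.empty
def icnt (bl : List (PySem.Set String)) (i j : Nat) : Int :=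
  ((bkt bl j).filter (fun a => (bkt bl i).contains a)).length
def seenIdx (bl : List (PySem.Set String)) (n : Nat) (s : String) : List Int :=
  ((List.range n).filter (fun m => (bkt bl m).contains s)).map (fun (m : Nat) => (m : Int))
def cIdx (bl : List (PySem.Set String)) (n : Nat) (i j : Int) : Int :=
  if 0 ≤ i ∧ i < j ∧ j < (n : Int) then icnt bl i.toNat j.toNat else 0

lemma groupStep_nodup (l : List (PySem.Set String)) (s : String)
    (h : ∀ t ∈ l, t.Nodup) : ∀ t ∈ groupStep l s, t.Nodup := by
  have hset : ∀ (idx : Nat) (x : String),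
      ∀ t ∈ l.set idx ((l.getD idx PySem.Set.empty).add x), t.Nodup := by
    intro idx x t ht
    rcases List.mem_or_eq_of_mem_set ht with h1 | h2
    · exact h t h1
    · subst h2
      apply PySem.Set.nodup_add
      rcases Nat.lt_or_ge idx l.length with hlt | hge
      · rw [List.getD_eq_getElem l _ hlt]; exact h _ (List.getElem_mem hlt)
      · rw [List.getD_eq_default l _ hge]; exact List.nodup_nil
  unfold groupStep
  cases PySem.Str.pyGet? s 0 with
  | none => exact h
  | some c =>
    simp only []
    split_ifs <;> first | exact hset _ _ | exact h

lemma mkBuckets_nodup (ideas : List String) : ∀ t ∈ mkBuckets ideas, t.Nodup := by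
  unfold mkBuckets
  have h : ∀ (xs : List String) (l : List (PySem.Set String)),
      (∀ t ∈ l, t.Nodup) → ∀ t ∈ xs.foldl groupStep l, t.Nodup := by
    intro xs; induction xs with
    | nil => intro l hl; exact hl
    | cons a rest ih => intro l hl; exact ih _ (groupStep_nodup l a hl)
  apply h
  intro t ht
  rw [List.eq_of_mem_replicate ht]
  exact List.nodup_nil

lemma bkt_nodup (bl : List (PySem.Set String)) (hnd : ∀ t ∈ bl, t.Nodup) (k : Nat) :
    (bkt bl k).Nodup := by
  unfold bkt
  rcases Nat.lt_or_ge k bl.length with hlt | hge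
  · rw [List.getD_eq_getElem bl _ hlt]; exact hnd _ (List.getElem_mem hlt)
  · rw [List.getD_eq_default bl _ hge]; exact List.nodup_nil

lemma filter_mem_comm (s t : List String) (hs : s.Nodup) (ht : t.Nodup) :
    (s.filter (fun a => t.contains a)).length = (t.filter (fun a => s.contains a)).length := by
  apply List.Perm.length_eq
  rw [List.perm_ext_iff_of_nodup (hs.filter _) (ht.filter _)]
  intro x
  simp only [List.mem_filter, List.contains_iff_mem]
  tauto

lemma union_length (s t : PySem.Set String) (ht : t.Nodup) :
    (PySem.Set.union s t).length = s.length + (t.filter (fun a => !s.contains a)).length := by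
  show (s.update t).length = _
  rw [PySem.Set.update_eq_append_filter, PySem.Set.ofList_eq_self_of_nodup t ht,
    List.length_append]

lemma union_self (s : PySem.Set String) (hs : s.Nodup) : PySem.Set.union s s = s := by
  show s.update s = s
  rw [PySem.Set.update_eq_append_filter, PySem.Set.ofList_eq_self_of_nodup s hs]
  have h : s.filter (fun y => !s.contains y) = [] := by
    rw [List.filter_eq_nil_iff]
    intro a ha
    simp [ha]
  rw [h, List.append_nil]

lemma count_map_pair (prev : List Int) (i j j' : Int) :
    (prev.map (fun i' => ((i', j) : Int × Int))).count (i, j') =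
      if j' = j then prev.count i else 0 := by
  induction prev with
  | nil => simp
  | cons a rest ih =>
    simp only [List.map_cons, List.count_cons, ih, Prod.ext_iff, beq_iff_eq]
    by_cases hj : j' = j <;> by_cases ha : a = i <;> first | (simp [hj, ha]; omega) | simp [hj, ha]

lemma count_int_map_range (i : Int) (p : Nat → Bool) (n : Nat) :
    (((List.range n).filter p).map (fun (m : Nat) => (m : Int))).count i =
      if 0 ≤ i ∧ i < (n : Int) ∧ p i.toNat then 1 else 0 := by
  have hnd : (((List.range n).filter p).map (fun (m : Nat) => (m : Int))).Nodup :=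
    ((List.nodup_range).filter p).map (fun a b h => by exact_mod_cast h)
  have hm : i ∈ ((List.range n).filter p).map (fun (m : Nat) => (m : Int)) ↔
      0 ≤ i ∧ i < (n : Int) ∧ p i.toNat := by
    simp only [List.mem_map, List.mem_filter, List.mem_range]
    constructor
    · rintro ⟨m, ⟨hmn, hpm⟩, rfl⟩
      refine ⟨Int.natCast_nonneg m, by exact_mod_cast hmn, by simpa using hpm⟩
    · rintro ⟨h0, hn, hp⟩
      exact ⟨i.toNat, ⟨by omega, hp⟩, by omega⟩
  by_cases h : 0 ≤ i ∧ i < (n : Int) ∧ p i.toNat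
  · rw [if_pos h]; exact List.count_eq_one_of_mem hnd (hm.mpr h)
  · rw [if_neg h]; exact List.count_eq_zero.mpr (fun hc => h (hm.mp hc))

lemma altStep_fold_spec (j : Int) (l : List String) (hl : l.Nodup) :
    ∀ (seen : PySem.Dict String (List Int)) (common : PySem.Dict (Int × Int) Int),
    (∀ s, (List.foldl (altStep j) (seen, common) l).1.getD s [] =
       if s ∈ l then seen.getD s [] ++ [j] else seen.getD s []) ∧
    (∀ i j', (List.foldl (altStep j) (seen, common) l).2.getD (i, j') 0 =
       common.getD (i, j') 0 +
         if j' = j then (l.map (fun s => ((seen.getD s []).count i : Int))).sum else 0) := by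
  induction l with
  | nil =>
    intro seen common
    refine ⟨fun s => by simp, fun i j' => by simp⟩
  | cons a rest ih =>
    intro seen common
    have hna : a ∉ rest := (List.nodup_cons.mp hl).1
    have hrest : rest.Nodup := (List.nodup_cons.mp hl).2
    rw [List.foldl_cons]
    have hstep : altStep j (seen, common) a =
        (seen.insert a (seen.getD a [] ++ [j]),
         (seen.getD a []).foldl (fun cm i => cm.insert (i, j) (cm.getD (i, j) 0 + 1)) common) := rfl
    rw [hstep]
    obtain ⟨ihs, ihc⟩ := ih hrest (seen.insert a (seen.getD a [] ++ [j]))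
      ((seen.getD a []).foldl (fun cm i => cm.insert (i, j) (cm.getD (i, j) 0 + 1)) common)
    constructor
    · intro s
      rw [ihs s]
      by_cases hsa : s = a
      · subst hsa
        simp [hna]
      · simp [PySem.Dict.getD_insert, hsa, List.mem_cons]
    · intro i j'
      rw [ihc i j']
      have hc' : ((seen.getD a []).foldl
            (fun cm i' => cm.insert (i', j) (cm.getD (i', j) 0 + 1)) common).getD (i, j') 0
          = common.getD (i, j') 0 + if j' = j then ((seen.getD a []).count i : Int) else 0 := by
        rw [show ((seen.getD a []).foldl
              (fun cm i' => cm.insert (i', j) (cm.getD (i', j) 0 + 1)) common)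
            = (((seen.getD a []).map (fun i' => ((i', j) : Int × Int))).foldl
                (fun d x => d.insert x (d.getD x 0 + 1)) common) from
            (List.foldl_map (f := fun i' => ((i', j) : Int × Int))
              (g := fun d x => d.insert x (d.getD x 0 + 1))
              (l := seen.getD a []) (init := common)).symm,
          PySem.Dict.getD_foldl_insert_add_one, count_map_pair]
        split_ifs <;> simp
      rw [hc']
      have hmap : rest.map (fun s => (((seen.insert a (seen.getD a [] ++ [j])).getD s []).count i : Int))
          = rest.map (fun s => ((seen.getD s []).count i : Int)) := by
        apply List.map_congr_left
        intro s hs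
        rw [PySem.Dict.getD_insert, if_neg (by rintro rfl; exact hna hs)]
      rw [hmap]
      simp only [List.map_cons, List.sum_cons]
      split_ifs <;> ring

lemma invStep_fold_spec (bl : List (PySem.Set String)) (hnd : ∀ t ∈ bl, t.Nodup) (n : Nat) :
    (∀ s, ((PySem.List.pyRange 0 (n : Int)).foldl (invStep bl)
        (PySem.Dict.empty, PySem.Dict.empty)).1.getD s [] = seenIdx bl n s) ∧
    (∀ i j, ((PySem.List.pyRange 0 (n : Int)).foldl (invStep bl)
        (PySem.Dict.empty, PySem.Dict.empty)).2.getD (i, j) 0 = cIdx bl n i j) := by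
  induction n with
  | zero =>
    rw [show PySem.List.pyRange (0:Int) ((0:Nat):Int) = [] by norm_num]
    refine ⟨fun s => by simp [seenIdx], fun i j => by simp [cIdx]; omega⟩
  | succ n ihn =>
    obtain ⟨ihs, ihc⟩ := ihn
    rw [show (((n + 1 : Nat)) : Int) = (n : Int) + 1 by push_cast; ring,
      PySem.List.pyRange_one_succ_right (by positivity), List.foldl_append]
    set st := (PySem.List.pyRange 0 (n : Int)).foldl (invStep bl)
      (PySem.Dict.empty, PySem.Dict.empty) with hst
    have hb : PySem.List.pyGetD bl ((n : Nat) : Int) PySem.Set.empty = bkt bl n := by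
      rw [PySem.List.pyGetD_of_nonneg _ _ (by positivity)]
      simp [bkt]
    have hfold : List.foldl (invStep bl) st [(n : Int)]
        = List.foldl (altStep (n : Int)) (st.1, st.2) (bkt bl n) := by
      simp only [List.foldl_cons, List.foldl_nil]
      unfold invStep
      rw [hb]
    rw [hfold]
    obtain ⟨hs2, hc2⟩ := altStep_fold_spec (n : Int) (bkt bl n) (bkt_nodup bl hnd n) st.1 st.2
    constructor
    · intro s
      rw [hs2 s, ihs s]
      unfold seenIdx
      rw [List.range_succ, List.filter_append, List.map_append]
      by_cases hmem : s ∈ bkt bl n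
      · rw [if_pos hmem]
        simp [hmem]
      · rw [if_neg hmem]
        simp [hmem]
    · intro i j'
      rw [hc2 i j', ihc i j']
      have hmap : (bkt bl n).map (fun s => ((st.1.getD s []).count i : Int))
          = (bkt bl n).map (fun s =>
              if 0 ≤ i ∧ i < (n : Int) ∧ (bkt bl i.toNat).contains s then (1 : Int) else 0) := by
        apply List.map_congr_left
        intro s _
        rw [ihs s]
        unfold seenIdx
        rw [count_int_map_range]
        split_ifs <;> simp
      rw [hmap]
      have hS : (List.map (fun s =>
            if 0 ≤ i ∧ i < (n : Int) ∧ (bkt bl i.toNat).contains s then (1 : Int) else 0)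
          (bkt bl n)).sum = if 0 ≤ i ∧ i < (n : Int) then icnt bl i.toNat n else 0 := by
        by_cases hi : 0 ≤ i ∧ i < (n : Int)
        · have hmap2 : (bkt bl n).map (fun s =>
                if 0 ≤ i ∧ i < (n : Int) ∧ (bkt bl i.toNat).contains s then (1 : Int) else 0)
              = (bkt bl n).map (fun s =>
                if (fun t => (bkt bl i.toNat).contains t) s then (1 : Int) else 0) := by
            apply List.map_congr_left
            intro s _
            by_cases hcb : (bkt bl i.toNat).contains s = true
            · have hm' : s ∈ bkt bl i.toNat := (PySem.Set.contains_iff _ _).mp hcb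
              simp [hm', hi.1, hi.2]
            · have hm' : s ∉ bkt bl i.toNat := by
                simpa [PySem.Set.contains_iff] using hcb
              rw [if_neg (by simp [hm']), if_neg (by simpa using hcb)]
          rw [hmap2, PySem.List.sum_map_ite_one_zero, List.countP_eq_length_filter,
            if_pos hi]
          rfl
        · have hmap2 : (bkt bl n).map (fun s =>
                if 0 ≤ i ∧ i < (n : Int) ∧ (bkt bl i.toNat).contains s then (1 : Int) else 0)
              = (bkt bl n).map (fun _ => (0 : Int)) := by
            apply List.map_congr_left
            intro s _
            rw [if_neg (by tauto)]
          rw [hmap2, if_neg hi]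
          simp
      rw [hS]
      by_cases hj : j' = (n : Int)
      · subst hj
        unfold cIdx
        rw [if_neg (by omega), zero_add]
        simp only [Int.toNat_natCast]
        have hc1 : ((0 ≤ i ∧ i < (n : Int) ∧ (n : Int) < ((n + 1 : Nat) : Int)) ↔
            (0 ≤ i ∧ i < (n : Int))) := by
          constructor
          · rintro ⟨h1, h2, _⟩; exact ⟨h1, h2⟩
          · rintro ⟨h1, h2⟩; exact ⟨h1, h2, by push_cast; omega⟩
        rw [if_congr hc1 rfl rfl]
        simp
      · rw [if_neg hj, add_zero]
        unfold cIdx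
        have hcast : ((n + 1 : Nat) : Int) = (n : Int) + 1 := by push_cast; ring
        rw [hcast]
        have hc2' : ((0 ≤ i ∧ i < j' ∧ j' < (n : Int) + 1) ↔ (0 ≤ i ∧ i < j' ∧ j' < (n : Int))) := by
          constructor
          · rintro ⟨h1, h2, h3⟩; exact ⟨h1, h2, by omega⟩
          · rintro ⟨h1, h2, h3⟩; exact ⟨h1, h2, by omega⟩
        rw [if_congr hc2' rfl rfl]

set_option maxRecDepth 4096 in
lemma main_eq (bl : List (PySem.Set String)) (hnd : ∀ t ∈ bl, t.Nodup) :
    ((PySem.List.pyRange 0 26).foldl (fun ans i =>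
      let s1 := PySem.List.pyGetD bl i PySem.Set.empty
      let x1 : Int := s1.length
      (PySem.List.pyRange i 26).foldl (fun ans j =>
        let s2 := PySem.List.pyGetD bl j PySem.Set.empty
        let x2 : Int := s2.length
        let s2' := PySem.Set.union s2 s1
        ans + ((s2'.length : Int) - x2) * ((s2'.length : Int) - x1)) ans) 0) * 2
    = 2 * (PySem.List.pyRange 0 26).foldl (fun ans i =>
      (PySem.List.pyRange (i + 1) 26).foldl (fun ans j =>
        let c := (((PySem.List.pyRange 0 26).foldl (invStep bl)
            (PySem.Dict.empty, PySem.Dict.empty)).2).getD (i, j) 0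
        ans + (((PySem.List.pyGetD bl i PySem.Set.empty).length : Int) - c)
            * (((PySem.List.pyGetD bl j PySem.Set.empty).length : Int) - c)) ans) 0 := by
  have hcom : ∀ i j : Int, (((PySem.List.pyRange 0 26).foldl (invStep bl)
      (PySem.Dict.empty, PySem.Dict.empty)).2).getD (i, j) 0 = cIdx bl 26 i j := by
    have h := (invStep_fold_spec bl hnd 26).2
    rw [show ((26 : Nat) : Int) = (26 : Int) by norm_num] at h
    exact h
  rw [mul_comm]
  refine congrArg (fun z : Int => 2 * z) ?_
  apply PySem.List.foldl_congr_mem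
  intro acc i hi
  rw [PySem.List.mem_pyRange_one] at hi
  have hs1nd : (PySem.List.pyGetD bl i PySem.Set.empty).Nodup := by
    rw [PySem.List.pyGetD_of_nonneg _ _ hi.1]
    exact bkt_nodup bl hnd i.toNat
  rw [PySem.List.pyRange_one_cons (by omega), List.foldl_cons]
  simp only []
  rw [union_self _ hs1nd, sub_self, zero_mul, add_zero]
  apply PySem.List.foldl_congr_mem
  intro acc2 j hj
  rw [PySem.List.mem_pyRange_one] at hj
  have hs2nd : (PySem.List.pyGetD bl j PySem.Set.empty).Nodup := by
    rw [PySem.List.pyGetD_of_nonneg _ _ (by omega)]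
    exact bkt_nodup bl hnd j.toNat
  rw [hcom i j]
  have hc : cIdx bl 26 i j = icnt bl i.toNat j.toNat := by
    unfold cIdx
    rw [if_pos ⟨hi.1, by omega, by omega⟩]
  rw [hc]
  have hicnt : icnt bl i.toNat j.toNat
      = (((PySem.List.pyGetD bl i PySem.Set.empty).filter
          (fun a => (PySem.List.pyGetD bl j PySem.Set.empty).contains a)).length : Int) := by
    unfold icnt
    rw [show bkt bl i.toNat = PySem.List.pyGetD bl i PySem.Set.empty from
        (PySem.List.pyGetD_of_nonneg _ _ hi.1).symm,
      show bkt bl j.toNat = PySem.List.pyGetD bl j PySem.Set.empty from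
        (PySem.List.pyGetD_of_nonneg _ _ (by omega : (0:Int) ≤ j)).symm]
    simp only [PySem.Set.contains_eq_listContains]
    exact_mod_cast filter_mem_comm _ _ hs2nd hs1nd
  rw [hicnt, union_length _ _ hs1nd]
  have hsplit : ((PySem.List.pyGetD bl i PySem.Set.empty).filter
        (fun a => (PySem.List.pyGetD bl j PySem.Set.empty).contains a)).length
      + ((PySem.List.pyGetD bl i PySem.Set.empty).filter
        (fun a => !(PySem.List.pyGetD bl j PySem.Set.empty).contains a)).length
      = (PySem.List.pyGetD bl i PySem.Set.empty).length :=
    (List.length_eq_length_filter_add _).symm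
  push_cast
  have he : (((PySem.List.pyGetD bl i PySem.Set.empty).filter
        (fun a => !(PySem.List.pyGetD bl j PySem.Set.empty).contains a)).length : Int)
      = ((PySem.List.pyGetD bl i PySem.Set.empty).length : Int)
        - (((PySem.List.pyGetD bl i PySem.Set.empty).filter
          (fun a => (PySem.List.pyGetD bl j PySem.Set.empty).contains a)).length : Int) := by
    omega
  rw [he]
  ring

-- ===== VERDICT (by name: the statement is the Claim_ definition above) =====
theorem solve_spec : Claim_equal_solve := by
  intro ideas _ _
  unfold Spec_solve
  show solve ideas = solve_alt ideas
  simp only [solve, solve_alt]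
  exact main_eq (mkBuckets ideas) (mkBuckets_nodup ideas)
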